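-- pv_equiv track=rewrite | github.com/demeet2k/athena-square-earth | MATH/FINAL FORM/FRAMEWORKS CODE/Athena OS/athena_os/squaring/integration.py | pythagorean_decomposition
-- ===== SOURCE A (Python) =====
-- from typing import Dict, List, Optional, Any, Tuple, Iterator
-- import math
--
-- def pythagorean_decomposition(value: int) -> Optional[Tuple[int, int]]:
--     """
--     Decompose value into circle + square components if possible.
--
--     Finds (a², b²) such that a² + b² = value.
--     """
--     for a in range(1, int(math.sqrt(value)) + 1):
--         a_sq = a * a
--         b_sq = value - a_sq
--         b = int(math.sqrt(b_sq))
--         if b * b == b_sq: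
--             return (a_sq, b_sq)
--     return None
-- ===== SOURCE B (Python) =====
-- import math
--
-- def pythagorean_decomposition(value):
--     # Monotone two-pointer sweep: b only ever decreases across all a.
--     b = math.isqrt(value)
--     a = 1
--     while a * a <= value:
--         while a * a + b * b > value:
--             b -= 1
--         if a * a + b * b == value:
--             return (a * a, b * b)
--         a += 1
--     return None
-- ===== Notes on version B (the rewrite author's own statement) =====
-- stated objective: alternative
-- what changed: Replaced the per-candidate sqrt test (one int(math.sqrt(...)) perfect-square check per a) with a monotone two-pointer sweep in which a single b pointer, initialised to isqrt(value), only ever decreases across the whole scan and no per-iteration square root is taken.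
import Mathlib
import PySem

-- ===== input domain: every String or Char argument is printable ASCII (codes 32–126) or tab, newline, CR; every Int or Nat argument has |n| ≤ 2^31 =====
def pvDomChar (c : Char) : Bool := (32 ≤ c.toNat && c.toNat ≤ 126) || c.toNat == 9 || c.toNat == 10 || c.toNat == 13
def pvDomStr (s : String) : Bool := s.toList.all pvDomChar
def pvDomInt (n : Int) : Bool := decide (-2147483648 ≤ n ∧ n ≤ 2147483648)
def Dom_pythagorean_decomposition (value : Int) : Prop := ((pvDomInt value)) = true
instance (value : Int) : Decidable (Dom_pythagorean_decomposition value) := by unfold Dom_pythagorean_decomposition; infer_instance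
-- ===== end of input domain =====

-- B replaces A's per-candidate sqrt perfect-square test by a monotone two-pointer sweep
-- (one b pointer that only decreases); same O(sqrt n) cost, no per-iteration sqrt.

-- int(math.sqrt(x)) and math.isqrt(x) both equal the integer square root for 0 ≤ x ≤ 2^31
-- (the double rounding error is far below the gap to the next integer there), ported as:
def isqrtI (x : Int) : Int := (Nat.sqrt x.toNat : Int)

-- ===== PORT A =====
-- for a in range(1, int(math.sqrt(value)) + 1): perfect-square test on value - a*a
def aGo (value : Int) : List Int → Option (Int × Int)
  | [] => none
  | a :: rest =>
      let a_sq := a * a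
      let b_sq := value - a_sq
      let b := isqrtI b_sq
      if b * b = b_sq then some (a_sq, b_sq) else aGo value rest

def pythagorean_decomposition (value : Int) : Option (Int × Int) :=
  aGo value (PySem.List.pyRange 1 (isqrtI value + 1) 1)

-- ===== PORT B =====
-- inner 'while a*a + b*b > value: b -= 1' (fuel b.toNat suffices: b never drops below 0)
def pdAltInner (value a : Int) : Nat → Int → Int
  | 0, b => b
  | fuel + 1, b => if value < a * a + b * b then pdAltInner value a fuel (b - 1) else b

-- outer 'while a*a <= value' (fuel value.toNat + 1 suffices: at most isqrt(value) iterations)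
def pdAltLoop (value : Int) : Nat → Int → Int → Option (Int × Int)
  | 0, _, _ => none
  | fuel + 1, a, b =>
      if a * a ≤ value then
        let b' := pdAltInner value a b.toNat b
        if a * a + b' * b' = value then some (a * a, b' * b')
        else pdAltLoop value fuel (a + 1) b'
      else none

def pythagorean_decomposition_alt (value : Int) : Option (Int × Int) :=
  pdAltLoop value (value.toNat + 1) 1 (isqrtI value)

-- ===== PRECONDITION & SPEC =====
-- Pre_ excludes value < 0, where Python A raises ValueError (math.sqrt of a negative).
def Pre_pythagorean_decomposition (value : Int) : Prop := 0 ≤ value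
instance (value : Int) : Decidable (Pre_pythagorean_decomposition value) := by unfold Pre_pythagorean_decomposition; infer_instance
def pvWitness_pythagorean_decomposition : Int := 5

def Spec_pythagorean_decomposition (value : Int) (out : Option (Int × Int)) : Prop := out = pythagorean_decomposition_alt value
instance (value : Int) (out : Option (Int × Int)) : Decidable (Spec_pythagorean_decomposition value out) := by unfold Spec_pythagorean_decomposition; infer_instance

-- ===== CLAIM (what is proved, stated in full; the proofs are below) =====
def Claim_equal_pythagorean_decomposition : Prop := ∀ (value : Int), Dom_pythagorean_decomposition value → Pre_pythagorean_decomposition value → Spec_pythagorean_decomposition value (pythagorean_decomposition value)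

-- ===== LEMMAS AND PROOFS =====

lemma isqrtI_nonneg (x : Int) : 0 ≤ isqrtI x := Int.natCast_nonneg _

lemma isqrtI_sq_le (x : Int) (hx : 0 ≤ x) : isqrtI x * isqrtI x ≤ x := by
  unfold isqrtI
  have h0 := Nat.sqrt_le' x.toNat
  rw [pow_two] at h0
  have h : (↑(Nat.sqrt x.toNat * Nat.sqrt x.toNat) : Int) ≤ (x.toNat : Int) := by exact_mod_cast h0
  push_cast at h
  rwa [Int.toNat_of_nonneg hx] at h

lemma lt_isqrtI_succ (x : Int) (hx : 0 ≤ x) : x < (isqrtI x + 1) * (isqrtI x + 1) := by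
  unfold isqrtI
  have h0 := Nat.lt_succ_sqrt' x.toNat
  rw [Nat.succ_eq_add_one, pow_two] at h0
  have h : (x.toNat : Int) < (↑((Nat.sqrt x.toNat + 1) * (Nat.sqrt x.toNat + 1)) : Int) := by exact_mod_cast h0
  push_cast at h
  rwa [Int.toNat_of_nonneg hx] at h

-- square comparison for nonnegative integers
lemma sq_lt_imp (u w : Int) (hu : 0 ≤ u) (hw : 0 ≤ w) (h : u * u < w * w) : u < w := by
  by_contra hc
  push Not at hc
  nlinarith

-- the inner while loop lands exactly on t, the isqrt of value - a*a
lemma pdAltInner_eq (v a t : Int) (ht0 : 0 ≤ t)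
    (ht1 : a * a + t * t ≤ v) (ht2 : v < a * a + (t + 1) * (t + 1)) :
    ∀ (fuel : Nat) (b : Int), t ≤ b → (b - t).toNat ≤ fuel → pdAltInner v a fuel b = t := by
  intro fuel
  induction fuel with
  | zero =>
      intro b htb hf
      have : b = t := by omega
      simp [pdAltInner, this]
  | succ n ih =>
      intro b htb hf
      simp only [pdAltInner]
      split_ifs with h
      · have hne : b ≠ t := by
          intro he; rw [he] at h; linarith
        exact ih (b - 1) (by omega) (by omega)
      · push Not at h
        have hb2 : b * b < (t + 1) * (t + 1) := by linarith
        have : b < t + 1 := sq_lt_imp b (t + 1) (le_trans ht0 htb) (by omega) hb2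
        omega

lemma pdAltLoop_eq (v : Int) (hv : 0 ≤ v) :
    ∀ (n : Nat) (a b : Int), 1 ≤ a → (v + 1 - a).toNat < n → 0 ≤ b →
      (a * a ≤ v → v - a * a < (b + 1) * (b + 1)) →
      pdAltLoop v n a b = aGo v (PySem.List.pyRange a (isqrtI v + 1) 1) := by
  intro n
  induction n with
  | zero => intro a b _ hf _ _; omega
  | succ n ih =>
      intro a b ha hf hb hinv
      by_cases hle : a * a ≤ v
      · have hbsq : (0:Int) ≤ v - a * a := by linarith
        set t := isqrtI (v - a * a) with htdef
        have ht0 : 0 ≤ t := isqrtI_nonneg _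
        have ht1 : t * t ≤ v - a * a := isqrtI_sq_le _ hbsq
        have ht2 : v - a * a < (t + 1) * (t + 1) := lt_isqrtI_succ _ hbsq
        have htb : t ≤ b := by
          have h1 : t * t < (b + 1) * (b + 1) := by
            have := hinv hle; linarith
          have := sq_lt_imp t (b + 1) ht0 (by omega) h1
          omega
        have hdec : pdAltInner v a b.toNat b = t :=
          pdAltInner_eq v a t ht0 (by linarith) (by linarith) b.toNat b htb (by omega)
        have hasv : a < isqrtI v + 1 := by
          have hsv2 := lt_isqrtI_succ v hv
          have h2 : a * a < (isqrtI v + 1) * (isqrtI v + 1) := by linarith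
          have := sq_lt_imp a (isqrtI v + 1) (by omega) (by have := isqrtI_nonneg v; omega) h2
          omega
        rw [PySem.List.pyRange_one_cons hasv]
        simp only [pdAltLoop, aGo, hdec, ← htdef]
        rw [if_pos hle]
        by_cases hps : t * t = v - a * a
        · rw [if_pos (show a * a + t * t = v by linarith), if_pos hps, hps]
        · rw [if_neg (show ¬ a * a + t * t = v from fun h => hps (by linarith)), if_neg hps]
          have hav : a ≤ v := by nlinarith
          exact ih (a + 1) t (by omega) (by omega) ht0 (fun _ => by nlinarith)
      · push Not at hle
        have hsv : isqrtI v + 1 ≤ a := by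
          by_contra hc
          push Not at hc
          have ha0 : (0:Int) ≤ a := by omega
          have h1 : a * a ≤ isqrtI v * isqrtI v :=
            mul_le_mul (by omega) (by omega) ha0 (isqrtI_nonneg v)
          have := isqrtI_sq_le v hv
          linarith
        rw [PySem.List.pyRange_one_eq_nil hsv]
        simp only [pdAltLoop, aGo]
        rw [if_neg (not_le.mpr hle)]

-- ===== VERDICT (by name: the statement is the Claim_ definition above) =====
theorem pythagorean_decomposition_spec : Claim_equal_pythagorean_decomposition := by
  intro v _ hv
  unfold Spec_pythagorean_decomposition pythagorean_decomposition pythagorean_decomposition_alt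
  have h := pdAltLoop_eq v hv (v.toNat + 1) 1 (isqrtI v) (le_refl 1) (by omega)
    (isqrtI_nonneg v) (by intro _; have := lt_isqrtI_succ v hv; linarith)
  exact h.symm
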